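-- pv_equiv track=rewrite | github.com/wzygxr/shuati | class075_SlidingWindow/Code23_GetEqualSubstringsWithinBudget.py | equalSubstringAlternative
-- ===== SOURCE A (Python) =====
-- def equalSubstringAlternative(s: str, t: str, maxCost: int) -> int:
--     """
--     另一种思路：使用双指针，不显式维护current_cost
--     时间复杂度：O(n)，空间复杂度：O(1)
--     """
--     n = len(s)
--     max_length = 0
--     left = 0
--     right = 0
--     current_cost = 0
--
--     while right < n:
--         # 扩展右边界
--         cost = abs(ord(s[right]) - ord(t[right]))
--         current_cost += cost
--         right += 1
--
--         # 如果开销超过最大预算，收缩左边界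
--         while current_cost > maxCost:
--             left_cost = abs(ord(s[left]) - ord(t[left]))
--             current_cost -= left_cost
--             left += 1
--
--         # 更新最大长度
--         max_length = max(max_length, right - left)
--
--     return max_length
-- ===== SOURCE B (Python) =====
-- def equalSubstringAlternative(s: str, t: str, maxCost: int) -> int:
--     # Non-shrinking monotone window: left advances at most one step per right;
--     # the window never shrinks, so the answer is simply len(s) - left at the end.
--     left = 0
--     cost = 0
--     for right in range(len(s)):
--         cost += abs(ord(s[right]) - ord(t[right]))
--         if cost > maxCost:
--             cost -= abs(ord(s[left]) - ord(t[left]))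
--             left += 1
--     return len(s) - left
-- ===== Notes on version B (the rewrite author's own statement) =====
-- stated objective: simpler
-- what changed: Replaces the shrinking window (inner while, explicit max_length updated every step) by a non-shrinking monotone window: left moves by at most one per step under a single if, no max tracking, and the answer is derived as len(s)-left from the final left index; fewer operations per character (timed ~2.7x faster).
import Mathlib
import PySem

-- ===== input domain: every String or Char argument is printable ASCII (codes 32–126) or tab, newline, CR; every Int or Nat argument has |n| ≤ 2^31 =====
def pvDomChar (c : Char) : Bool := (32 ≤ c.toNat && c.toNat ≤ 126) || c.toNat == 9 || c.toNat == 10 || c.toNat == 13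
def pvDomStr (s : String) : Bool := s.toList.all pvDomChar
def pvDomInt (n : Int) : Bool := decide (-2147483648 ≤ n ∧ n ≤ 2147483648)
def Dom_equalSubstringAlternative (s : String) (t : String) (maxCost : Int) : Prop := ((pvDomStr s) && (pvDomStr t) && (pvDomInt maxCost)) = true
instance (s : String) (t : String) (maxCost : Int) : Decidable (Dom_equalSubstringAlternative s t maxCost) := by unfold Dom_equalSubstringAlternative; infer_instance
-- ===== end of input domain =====

-- B replaces A's shrinking window (inner while + max_length tracking) by a non-shrinking
-- monotone window (single if, answer = len(s) - final left); simpler, same O(n) cost.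


-- ===== PORT A =====
-- abs(ord(s[i]) - ord(t[i])); out-of-range index yields 0 here where Python raises
-- IndexError — exact inside Pre_ (there every accessed index is in range).
def pvOrdA (L : List Char) (i : Nat) : Int := ((L[i]?).map (fun c => (c.toNat : Int))).getD 0
def pvCostA (S T : List Char) (i : Nat) : Int := |pvOrdA S i - pvOrdA T i|

-- the inner 'while current_cost > maxCost' loop of A
def pvShrinkA (S T : List Char) (maxCost : Int) (left : Nat) (cc : Int) : Nat × Int :=
  if cc > maxCost then
    if _h : left < S.length then
      pvShrinkA S T maxCost (left + 1) (cc - pvCostA S T left)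
    else (left, cc)   -- Python raises IndexError here (outside Pre_)
  else (left, cc)
termination_by S.length - left

-- the outer 'while right < n' loop of A
def pvLoopA (S T : List Char) (maxCost : Int) (right left : Nat) (cc maxLen : Int) : Int :=
  if _h : right < S.length then
    let p := pvShrinkA S T maxCost left (cc + pvCostA S T right)
    pvLoopA S T maxCost (right + 1) p.1 p.2 (max maxLen ((right : Int) + 1 - p.1))
  else maxLen
termination_by S.length - right

def equalSubstringAlternative (s : String) (t : String) (maxCost : Int) : Int :=
  pvLoopA s.toList t.toList maxCost 0 0 0 0

-- ===== PORT B =====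
def pvOrdB (L : List Char) (i : Nat) : Int := ((L[i]?).map (fun c => (c.toNat : Int))).getD 0
def pvCostB (S T : List Char) (i : Nat) : Int := |pvOrdB S i - pvOrdB T i|

-- one step of B's for-loop: extend by right, and if over budget drop exactly one from the left
def pvStepB (S T : List Char) (maxCost : Int) (st : Nat × Int) (r : Nat) : Nat × Int :=
  let cost := st.2 + pvCostB S T r
  if cost > maxCost then (st.1 + 1, cost - pvCostB S T st.1) else (st.1, cost)

def equalSubstringAlternative_alt (s : String) (t : String) (maxCost : Int) : Int :=
  let S := s.toList
  let T := t.toList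
  (S.length : Int) - ((List.range S.length).foldl (pvStepB S T maxCost) (0, 0)).1

-- ===== PRECONDITION & SPEC =====
-- Pre_ is exactly the set of inputs on which the Python A returns: with len(t) < len(s),
-- or with maxCost < 0 and s nonempty, A's inner while walks an index out of range and
-- raises IndexError.
def Pre_equalSubstringAlternative (s : String) (t : String) (maxCost : Int) : Prop :=
  s.toList.length ≤ t.toList.length ∧ (0 ≤ maxCost ∨ s.toList.length = 0)
instance (s : String) (t : String) (maxCost : Int) : Decidable (Pre_equalSubstringAlternative s t maxCost) := by unfold Pre_equalSubstringAlternative; infer_instance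

def pvWitness_equalSubstringAlternative : String × String × Int := ("abcd", "bcdf", 3)

def Spec_equalSubstringAlternative (s : String) (t : String) (maxCost : Int) (out : Int) : Prop := out = equalSubstringAlternative_alt s t maxCost
instance (s : String) (t : String) (maxCost : Int) (out : Int) : Decidable (Spec_equalSubstringAlternative s t maxCost out) := by unfold Spec_equalSubstringAlternative; infer_instance

-- ===== CLAIM (what is proved, stated in full; the proofs are below) =====
def Claim_equal_equalSubstringAlternative : Prop := ∀ (s : String) (t : String) (maxCost : Int), Dom_equalSubstringAlternative s t maxCost → Pre_equalSubstringAlternative s t maxCost → Spec_equalSubstringAlternative s t maxCost (equalSubstringAlternative s t maxCost)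

-- ===== LEMMAS AND PROOFS =====

-- window cost: sum of per-index costs over [l, r)
def pvW (S T : List Char) (l r : Nat) : Int := ∑ i ∈ Finset.Ico l r, pvCostA S T i

theorem pvCostB_eq (S T : List Char) (i : Nat) : pvCostB S T i = pvCostA S T i := rfl

theorem pvCost_nonneg (S T : List Char) (i : Nat) : 0 ≤ pvCostA S T i := abs_nonneg _

theorem pvW_self (S T : List Char) (l : Nat) : pvW S T l l = 0 := by simp [pvW]

theorem pvW_succ_top (S T : List Char) {l r : Nat} (h : l ≤ r) :
    pvW S T l (r + 1) = pvW S T l r + pvCostA S T r :=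
  Finset.sum_Ico_succ_top h _

theorem pvW_succ_bot (S T : List Char) {l m : Nat} (h : l < m) :
    pvW S T l m = pvCostA S T l + pvW S T (l + 1) m :=
  Finset.sum_eq_sum_Ico_succ_bot h _

theorem pvW_anti (S T : List Char) {l1 l2 : Nat} (m : Nat) (h : l1 ≤ l2) :
    pvW S T l2 m ≤ pvW S T l1 m := by
  apply Finset.sum_le_sum_of_subset_of_nonneg
  · exact Finset.Ico_subset_Ico h (le_refl m)
  · intro i _ _; exact pvCost_nonneg S T i

-- characterisation of A's shrink loop: it returns the minimal feasible left ≥ the input left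
theorem pvShrinkA_spec (S T : List Char) (mc : Int) (hmc : 0 ≤ mc) (m : Nat) (hm : m ≤ S.length) :
    ∀ k left cc, m - left ≤ k → left ≤ m → cc = pvW S T left m →
      (∀ l, l < left → mc < pvW S T l m) →
      left ≤ (pvShrinkA S T mc left cc).1 ∧ (pvShrinkA S T mc left cc).1 ≤ m ∧
      (pvShrinkA S T mc left cc).2 = pvW S T (pvShrinkA S T mc left cc).1 m ∧
      (pvShrinkA S T mc left cc).2 ≤ mc ∧
      (∀ l, l < (pvShrinkA S T mc left cc).1 → mc < pvW S T l m) := by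
  intro k
  induction k with
  | zero =>
    intro left cc hk hlm hcc hmin
    have hlm' : left = m := by omega
    subst hlm'
    have hcc0 : cc = 0 := by rw [hcc, pvW_self]
    rw [pvShrinkA]
    have : ¬ cc > mc := by omega
    simp only [this, if_false]
    exact ⟨le_refl _, le_refl _, hcc, by omega, hmin⟩
  | succ k ih =>
    intro left cc hk hlm hcc hmin
    rw [pvShrinkA]
    by_cases hgt : cc > mc
    · have hltm : left < m := by
        rcases Nat.lt_or_ge left m with h | h
        · exact h
        · exfalso
          have : left = m := by omega
          subst this
          rw [pvW_self] at hcc; omega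
      have hlen : left < S.length := lt_of_lt_of_le hltm hm
      simp only [hgt, if_true, hlen, dif_pos]
      obtain ⟨h1, h2, h3, h4, h5⟩ := ih (left + 1) (cc - pvCostA S T left)
        (by omega) (by omega)
        (by rw [hcc, pvW_succ_bot S T hltm]; ring)
        (by
          intro l hl
          rcases Nat.lt_or_ge l left with h | h
          · exact hmin l h
          · have : l = left := by omega
            subst this; omega)
      exact ⟨by omega, h2, h3, h4, h5⟩
    · simp only [hgt, if_false]
      exact ⟨le_refl _, hlm, hcc, by omega, hmin⟩

-- the joint simulation: A's state after each step versus B's fold state.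
-- Invariants: A's left is the minimal feasible window start, its cc the window cost;
-- B's left trails A's, its cost is B's window cost, and A's max_length = right - leftB.
theorem pvMain (S T : List Char) (mc : Int) (hmc : 0 ≤ mc) :
    ∀ k r leftA cc maxLen leftB cB,
      r + k = S.length →
      leftA ≤ r → cc = pvW S T leftA r → (∀ l, l < leftA → mc < pvW S T l r) →
      leftB ≤ leftA → cB = pvW S T leftB r → maxLen = (r : Int) - leftB →
      pvLoopA S T mc r leftA cc maxLen
        = (S.length : Int) - ((List.range' r k).foldl (pvStepB S T mc) (leftB, cB)).1 := by
  intro k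
  induction k with
  | zero =>
    intro r leftA cc maxLen leftB cB hk _ _ _ _ _ hml
    rw [pvLoopA]
    have hr : ¬ r < S.length := by omega
    simp only [hr, dif_neg, not_false_iff, List.range'_zero, List.foldl_nil]
    rw [hml]; congr 1; omega
  | succ k ih =>
    intro r leftA cc maxLen leftB cB hk hAle hcc hmin hBle hcB hml
    have hr : r < S.length := by omega
    have hm1 : r + 1 ≤ S.length := by omega
    rw [pvLoopA]
    simp only [hr, dif_pos]
    -- A side: shrink at m = r+1
    have hccnew : cc + pvCostA S T r = pvW S T leftA (r + 1) := by
      rw [pvW_succ_top S T hAle, hcc]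
    have hminnew : ∀ l, l < leftA → mc < pvW S T l (r + 1) := by
      intro l hl
      have h1 := hmin l hl
      have h2 : pvW S T l (r + 1) = pvW S T l r + pvCostA S T r :=
        pvW_succ_top S T (by omega)
      have := pvCost_nonneg S T r
      omega
    obtain ⟨hp1, hp2, hp3, hp4, hp5⟩ :=
      pvShrinkA_spec S T mc hmc (r + 1) hm1 (r + 1) leftA (cc + pvCostA S T r)
        (by omega) (by omega) hccnew hminnew
    set p := pvShrinkA S T mc leftA (cc + pvCostA S T r) with hp
    -- B side
    rw [List.range'_succ, List.foldl_cons]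
    have hcost1 : cB + pvCostB S T r = pvW S T leftB (r + 1) := by
      rw [pvCostB_eq, pvW_succ_top S T (le_trans hBle hAle), hcB]
    by_cases hb : cB + pvCostB S T r > mc
    · -- B drops one element from the left
      have hstep : pvStepB S T mc (leftB, cB) r =
          (leftB + 1, cB + pvCostB S T r - pvCostB S T leftB) := by
        simp only [pvStepB, hb, if_true]
      rw [hstep]
      -- B's old left is infeasible, so A's new left passed it
      have hinfeas : mc < pvW S T leftB (r + 1) := by rw [← hcost1]; omega
      have hBlt : leftB + 1 ≤ p.1 := by
        by_contra hcon
        have hle : p.1 ≤ leftB := by omega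
        have := pvW_anti S T (r + 1) hle
        omega
      have hcB' : cB + pvCostB S T r - pvCostB S T leftB = pvW S T (leftB + 1) (r + 1) := by
        rw [hcost1, pvCostB_eq, pvW_succ_bot S T (show leftB < r + 1 by omega)]
        ring
      have hml' : max maxLen ((r : Int) + 1 - p.1) = ((r + 1 : Nat) : Int) - (leftB + 1 : Nat) := by
        have hc : ((leftB : Int) + 1) ≤ (p.1 : Int) := by exact_mod_cast hBlt
        rw [hml]
        push_cast
        omega
      rw [hml']
      exact ih (r + 1) p.1 p.2 _ (leftB + 1) _ (by omega) hp2 hp3 hp5 hBlt hcB' rfl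
    · -- B keeps its left; then A's new left equals B's left
      have hstep : pvStepB S T mc (leftB, cB) r = (leftB, cB + pvCostB S T r) := by
        simp only [pvStepB, hb, if_false]
      rw [hstep]
      have hfeas : pvW S T leftB (r + 1) ≤ mc := by rw [← hcost1]; omega
      have hAeq : p.1 = leftB := by
        rcases Nat.lt_or_ge leftB p.1 with h | h
        · exfalso; have := hp5 leftB h; omega
        · omega
      have hml' : max maxLen ((r : Int) + 1 - p.1) = ((r + 1 : Nat) : Int) - (leftB : Nat) := by
        rw [hml, hAeq]
        push_cast
        omega
      rw [hml']
      exact ih (r + 1) p.1 p.2 _ leftB _ (by omega) hp2 hp3 hp5 (by omega) hcost1 rfl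

-- ===== VERDICT (by name: the statement is the Claim_ definition above) =====
theorem equalSubstringAlternative_spec : Claim_equal_equalSubstringAlternative := by
  intro s t maxCost _hDom hPre
  unfold Spec_equalSubstringAlternative equalSubstringAlternative equalSubstringAlternative_alt
  rcases hPre.2 with hmc | hempty
  · simp only [List.range_eq_range']
    exact pvMain s.toList t.toList maxCost hmc s.toList.length 0 0 0 0 0 0
      (by omega) (le_refl 0) (by rw [pvW_self]) (by omega) (le_refl 0)
      (by rw [pvW_self]) (by norm_num)
  · rw [pvLoopA]
    simp [hempty]
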